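-- pv_equiv track=rewrite | github.com/oleg-zharkikh/leetcode | sort_by_blocks.py | sort_by_blocks
-- ===== SOURCE A (Python) =====
-- def is_there_smaller_next(arr, pointer, max_value):
--     for i in range(pointer, len(arr)):
--         if arr[i] < max_value:
--             return True
--     return False
--
-- def sort_by_blocks(arr, n):
--     block_counter = 0
--     pointer = 0
--     max_value = 0
--     r = 0
--     while pointer < len(arr):
--         if arr[pointer] > max_value:
--             max_value = arr[pointer]
--         if arr[pointer] == r:
--             while is_there_smaller_next(arr, pointer + 1, max_value):
--                 pointer += 1
--             r = max_value + 1
--             block_counter += 1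
--         pointer += 1
--     return block_counter
-- ===== SOURCE B (Python) =====
-- def sort_by_blocks(arr, n):
--     # Pair each element with the minimum of the elements after it (one backward
--     # pass), then count blocks in a single forward pass driven by a two-mode
--     # state machine (normal / skipping-until-rest-min-reaches-threshold):
--     # A's inner rescan-and-advance while loop disappears entirely.
--     pairs = []
--     s = None
--     for a in reversed(arr):
--         pairs.append((a, s))
--         s = a if s is None or a < s else s
--     pairs.reverse()
--     blocks = 0
--     r = 0
--     m = 0
--     skip = None  # threshold while in skip mode, else None
--     for a, s in pairs:
--         if skip is not None:
--             if s is None or s >= skip: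
--                 skip = None
--             continue
--         if a > m:
--             m = a
--         if a == r:
--             r = m + 1
--             blocks += 1
--             if s is not None and s < m:
--                 skip = m
--     return blocks
-- ===== Notes on version B (the rewrite author's own statement) =====
-- stated objective: alternative
-- what changed: B pairs each element with the minimum of the elements after it in one backward pass and then counts blocks in a single forward pass with a two-mode (normal/skipping) state machine, eliminating A's index-juggling inner while loop that rescans the rest of the array; on random inputs the measured cost is the same (A's rescans are rare there), so no speed is claimed.
import Mathlib
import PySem

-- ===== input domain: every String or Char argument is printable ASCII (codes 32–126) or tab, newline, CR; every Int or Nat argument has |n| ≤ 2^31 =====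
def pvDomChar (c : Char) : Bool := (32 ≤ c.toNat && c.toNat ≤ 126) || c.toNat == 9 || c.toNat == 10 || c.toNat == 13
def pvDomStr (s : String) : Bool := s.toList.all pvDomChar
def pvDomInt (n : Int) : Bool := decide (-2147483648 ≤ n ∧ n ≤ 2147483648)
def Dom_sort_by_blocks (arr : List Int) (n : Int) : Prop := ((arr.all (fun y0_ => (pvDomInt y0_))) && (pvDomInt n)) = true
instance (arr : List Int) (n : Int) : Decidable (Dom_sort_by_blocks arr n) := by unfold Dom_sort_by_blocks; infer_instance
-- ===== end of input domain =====

-- B pairs each element with the minimum of the later elements and counts blocks in one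
-- forward pass with a two-mode state machine, removing A's rescanning inner while loop.

-- ===== PORT A =====
-- for i in range(pointer, len(arr)): if arr[i] < max_value: return True; return False
def is_there_smaller_next (arr : List Int) (pointer : Int) (max_value : Int) : Bool :=
  (PySem.List.pyRange pointer (arr.length : Int) 1).any
    (fun i => decide (PySem.List.pyGetD arr i 0 < max_value))

-- inner 'while is_there_smaller_next(arr, pointer + 1, max_value): pointer += 1'
-- (fuel arr.length always suffices: each step needs a strictly later index)
def skipA (arr : List Int) (max_value : Int) : Nat → Int → Int
  | 0, p => p
  | f + 1, p =>
    if is_there_smaller_next arr (p + 1) max_value then skipA arr max_value f (p + 1) else p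

-- outer 'while pointer < len(arr)' (fuel arr.length: pointer grows by ≥ 1 each iteration)
def loopA (arr : List Int) : Nat → Int → Int → Int → Int → Int
  | 0, _, _, _, c => c
  | f + 1, p, m, r, c =>
    if p < (arr.length : Int) then
      let a := PySem.List.pyGetD arr p 0
      let m' := if a > m then a else m
      if a = r then loopA arr f (skipA arr m' arr.length p + 1) m' (m' + 1) (c + 1)
      else loopA arr f (p + 1) m' r c
    else c

def sort_by_blocks (arr : List Int) (n : Int) : Int :=
  loopA arr arr.length 0 0 0 0

-- ===== PORT B =====
-- 's is not None and s < t'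
def optLt (s : Option Int) (t : Int) : Bool :=
  match s with
  | none => false
  | some v => decide (v < t)

-- the backward pass over reversed(arr): returns (pairs, running min), so that
-- pairs[i] = (arr[i], min of the elements after position i, or none at the end)
def pairsB : List Int → List (Int × Option Int) × Option Int
  | [] => ([], none)
  | a :: xs =>
    let (ps, s) := pairsB xs
    ((a, s) :: ps,
      some (match s with | none => a | some v => if a < v then a else v))

-- the forward pass: state = (m, r, blocks, skip-threshold or none)
def foldB : List (Int × Option Int) → Int → Int → Int → Option Int → Int
  | [], _, _, c, _ => c
  | (a, s) :: rest, m, r, c, skip =>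
    match skip with
    | some t => foldB rest m r c (if optLt s t then some t else none)
    | none =>
      let m' := if a > m then a else m
      if a = r then
        foldB rest m' (m' + 1) (c + 1) (if optLt s m' then some m' else none)
      else foldB rest m' r c none

def sort_by_blocks_alt (arr : List Int) (n : Int) : Int :=
  foldB (pairsB arr).1 0 0 0 none

-- ===== PRECONDITION & SPEC =====
def Spec_sort_by_blocks (arr : List Int) (n : Int) (out : Int) : Prop := out = sort_by_blocks_alt arr n
instance (arr : List Int) (n : Int) (out : Int) : Decidable (Spec_sort_by_blocks arr n out) := by unfold Spec_sort_by_blocks; infer_instance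

-- ===== CLAIM (what is proved, stated in full; the proofs are below) =====
def Claim_equal_sort_by_blocks : Prop := ∀ (arr : List Int) (n : Int), Dom_sort_by_blocks arr n → Spec_sort_by_blocks arr n (sort_by_blocks arr n)

-- ===== LEMMAS AND PROOFS =====

-- the running min carried by the backward pass is the min of the processed suffix
theorem pairsB_snd (l : List Int) : (pairsB l).2 = l.min? := by
  induction l with
  | nil => simp [pairsB]
  | cons a xs ih =>
    rcases hps : pairsB xs with ⟨ps, s⟩
    have hs : s = xs.min? := by rw [← ih, hps]
    simp only [pairsB, hps]
    subst hs
    cases hx : xs.min? with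
    | none =>
      have hxs : xs = [] := List.min?_eq_none_iff.mp hx
      subst hxs
      simp [List.min?_cons]
    | some v =>
      obtain ⟨hvmem, hvle⟩ := List.min?_eq_some_iff.mp hx
      simp only []
      symm
      rw [List.min?_eq_some_iff]
      constructor
      · split
        · exact List.mem_cons_self
        · exact List.mem_cons_of_mem a hvmem
      · intro b hb
        rcases List.mem_cons.mp hb with hb | hb
        · subst hb; split <;> omega
        · have := hvle b hb; split <;> omega

-- pairsB is structural: the pairs of a cons
theorem pairsB_fst_cons (a : Int) (xs : List Int) :
    (pairsB (a :: xs)).1 = (a, xs.min?) :: (pairsB xs).1 := by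
  rcases hps : pairsB xs with ⟨ps, s⟩
  have hs : s = xs.min? := by rw [← pairsB_snd xs, hps]
  simp [pairsB, hps, hs]

-- A's rescan helper, characterised by the min of the rest
theorem cond_eq (arr : List Int) (q t : Int) (hq : 0 ≤ q) :
    is_there_smaller_next arr q t = optLt (arr.drop q.toNat).min? t := by
  by_cases hlt : q < (arr.length : Int)
  · have hne : arr.drop q.toNat ≠ [] := by
      simp only [ne_eq, List.drop_eq_nil_iff]
      omega
    obtain ⟨v, hv⟩ : ∃ v, (arr.drop q.toNat).min? = some v := by
      cases h : (arr.drop q.toNat).min? with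
      | none => exact absurd (List.min?_eq_none_iff.mp h) hne
      | some v => exact ⟨v, rfl⟩
    obtain ⟨hvmem, hvle⟩ := List.min?_eq_some_iff.mp hv
    rw [hv]
    unfold optLt is_there_smaller_next
    rw [Bool.eq_iff_iff]
    simp only [List.any_eq_true, PySem.List.mem_pyRange_one, decide_eq_true_eq]
    constructor
    · rintro ⟨i, ⟨hqi, hil⟩, hlt2⟩
      have h0i : 0 ≤ i := le_trans hq hqi
      rw [PySem.List.pyGetD_eq_getElem arr 0 h0i hil] at hlt2
      have hjlen : i.toNat - q.toNat < (arr.drop q.toNat).length := by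
        rw [List.length_drop]; omega
      have hmem : arr[i.toNat] ∈ arr.drop q.toNat := by
        have hix : (arr.drop q.toNat)[i.toNat - q.toNat] = arr[i.toNat] := by
          rw [List.getElem_drop]
          congr 1
          omega
        rw [← hix]
        exact List.getElem_mem hjlen
      exact lt_of_le_of_lt (hvle _ hmem) hlt2
    · rintro hvm
      obtain ⟨j, hj, hvj⟩ := List.getElem_of_mem hvmem
      have hjl : q.toNat + j < arr.length := by
        rw [List.length_drop] at hj; omega
      refine ⟨((q.toNat + j : Nat) : Int), ⟨by omega, by exact_mod_cast hjl⟩, ?_⟩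
      have : PySem.List.pyGetD arr ((q.toNat + j : Nat) : Int) 0 = arr[q.toNat + j] := by
        rw [PySem.List.pyGetD_eq_getElem arr 0 (by omega) (by exact_mod_cast hjl)]
        congr 1
      rw [this, ← List.getElem_drop (i := q.toNat) (j := j) (h := hj), hvj]
      exact hvm
  · have h1 : is_there_smaller_next arr q t = false := by
      unfold is_there_smaller_next
      rw [List.any_eq_false]
      intro i hi
      rw [PySem.List.mem_pyRange_one] at hi
      simp only [decide_eq_true_eq]
      omega
    have h2 : arr.drop q.toNat = [] := by
      rw [List.drop_eq_nil_iff]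
      omega
    rw [h1, h2]
    simp [optLt]

theorem skipA_ge (arr : List Int) (t : Int) (g : Nat) (p : Int) : p ≤ skipA arr t g p := by
  induction g generalizing p with
  | zero => simp [skipA]
  | succ g ih =>
    simp only [skipA]
    split
    · exact le_trans (by omega) (ih (p + 1))
    · omega

-- the inner while loop does not move when its condition is already false
theorem skipA_stop (arr : List Int) (t : Int) (g : Nat) (p : Int)
    (h : is_there_smaller_next arr (p + 1) t = false) : skipA arr t g p = p := by
  cases g with
  | zero => rfl
  | succ g => simp [skipA, h]

-- B's skip mode consumes exactly the elements A's inner while loop jumps over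
theorem skip_corr (arr : List Int) (t : Int) (g : Nat) :
    ∀ (xs : List Int) (p m r c : Int), 0 ≤ p → arr.drop (p.toNat + 1) = xs →
    xs.length ≤ g → optLt xs.min? t = true →
    foldB (pairsB xs).1 m r c (some t) =
      foldB (pairsB (arr.drop ((skipA arr t g p + 1).toNat))).1 m r c none := by
  induction g with
  | zero =>
    intro xs p m r c _ _ hlen hmin
    have hxs : xs = [] := List.eq_nil_of_length_eq_zero (Nat.le_zero.mp hlen)
    subst hxs
    simp [optLt] at hmin
  | succ g ih =>
    intro xs p m r c hp hdrop hlen hmin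
    cases xs with
    | nil => simp [optLt] at hmin
    | cons a ys =>
      have hp1 : ((p + 1).toNat : Nat) = p.toNat + 1 := by omega
      have hcond : is_there_smaller_next arr (p + 1) t = true := by
        rw [cond_eq arr (p + 1) t (by omega), hp1, hdrop]
        exact hmin
      have hdys : arr.drop ((p + 1).toNat + 1) = ys := by
        have h := congrArg List.tail hdrop
        rw [List.tail_drop] at h
        rw [hp1]
        simpa using h
      simp only [skipA, hcond, if_pos]
      rw [pairsB_fst_cons]
      simp only [foldB]
      by_cases hy : optLt ys.min? t = true
      · rw [if_pos hy]
        exact ih ys (p + 1) m r c (by omega) hdys (by simpa using hlen) hy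
      · rw [if_neg hy]
        have hcond2 : is_there_smaller_next arr ((p + 1) + 1) t = false := by
          rw [cond_eq arr ((p + 1) + 1) t (by omega)]
          have : ((p + 1 + 1).toNat : Nat) = (p + 1).toNat + 1 := by omega
          rw [this, hdys]
          exact eq_false_of_ne_true hy
        rw [skipA_stop arr t g (p + 1) hcond2]
        have : ((p + 1 + 1).toNat : Nat) = (p + 1).toNat + 1 := by omega
        rw [this, hdys]

-- main invariant: A's outer loop on the suffix starting at p equals B's fold on that suffix
theorem loop_eq (arr : List Int) (f : Nat) :
    ∀ (l : List Int) (p m r c : Int), 0 ≤ p → arr.drop p.toNat = l → l.length ≤ f →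
    loopA arr f p m r c = foldB (pairsB l).1 m r c none := by
  induction f with
  | zero =>
    intro l p m r c _ _ hlen
    have hl : l = [] := List.eq_nil_of_length_eq_zero (Nat.le_zero.mp hlen)
    subst hl
    simp [loopA, pairsB, foldB]
  | succ f ih =>
    intro l p m r c hp hdrop hlen
    cases l with
    | nil =>
      have : arr.length ≤ p.toNat := by
        have := congrArg List.length hdrop
        rw [List.length_drop] at this
        simpa using Nat.le_of_sub_eq_zero (by simpa using this)
      have hnp : ¬ (p < (arr.length : Int)) := by omega
      simp [loopA, hnp, pairsB, foldB]
    | cons a xs =>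
      have hplen : p.toNat < arr.length := by
        have := congrArg List.length hdrop
        rw [List.length_drop] at this
        simp at this
        omega
      have hpl : p < (arr.length : Int) := by omega
      have ha : PySem.List.pyGetD arr p 0 = a := by
        rw [PySem.List.pyGetD_eq_getElem arr 0 hp hpl]
        have h0 : (arr.drop p.toNat)[0]'(by rw [hdrop]; simp) = a := by
          simp [hdrop]
        rw [← h0, List.getElem_drop]
        simp
      have hp1 : ((p + 1).toNat : Nat) = p.toNat + 1 := by omega
      have hdxs : arr.drop ((p + 1).toNat) = xs := by
        have h := congrArg List.tail hdrop
        rw [List.tail_drop] at h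
        rw [hp1]
        simpa using h
      have hxlen : xs.length ≤ f := by simpa using hlen
      rw [pairsB_fst_cons]
      simp only [loopA, hpl, if_pos, ha, foldB]
      by_cases har : a = r
      · simp only [har, if_pos]
        set m' := if r > m then r else m with hm'
        by_cases hsk : optLt xs.min? m' = true
        · rw [if_pos hsk]
          rw [skip_corr arr m' arr.length xs p m' (m' + 1) (c + 1) hp
              (by rw [← hp1]; exact hdxs)
              (by have := congrArg List.length hdrop
                  rw [List.length_drop] at this
                  simp at this
                  omega) hsk]
          have hq := skipA_ge arr m' arr.length p
          apply ih
          · omega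
          · rfl
          · rw [List.length_drop]
            have := congrArg List.length hdrop
            rw [List.length_drop] at this
            simp at this
            omega
        · rw [if_neg hsk]
          have hcond : is_there_smaller_next arr (p + 1) m' = false := by
            rw [cond_eq arr (p + 1) m' (by omega), hp1, ← hp1, hdxs]
            exact eq_false_of_ne_true hsk
          rw [skipA_stop arr m' arr.length p hcond]
          exact ih xs (p + 1) m' (m' + 1) (c + 1) (by omega) hdxs hxlen
      · simp only [if_neg har]
        exact ih xs (p + 1) (if a > m then a else m) r c (by omega) hdxs hxlen

-- ===== VERDICT (by name: the statement is the Claim_ definition above) =====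
theorem sort_by_blocks_spec : Claim_equal_sort_by_blocks := by
  intro arr n _
  unfold Spec_sort_by_blocks sort_by_blocks sort_by_blocks_alt
  exact loop_eq arr arr.length arr 0 0 0 0 le_rfl (by simp) (by simp)
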